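-- pv_equiv track=rewrite | github.com/vachelch/AI_Chall | helper/seed_words.py | word2rank_func
-- ===== SOURCE A (Python) =====
-- from collections import Counter
--
-- def word2rank_func(word2cnt):
-- 	cnt_set = set()
-- 	for word, cnt in word2cnt.items():
-- 		cnt_set.add(cnt)
--
-- 	cnt_list = sorted(list(cnt_set), reverse = True)
--
-- 	cnt2rank = dict()
-- 	for i, cnt in enumerate(cnt_list):
-- 		cnt2rank[cnt] = i
--
-- 	word2rank = Counter()
-- 	for word, cnt in word2cnt.items():
-- 		word2rank[word] = cnt2rank[cnt]
--
-- 	return word2rank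
-- ===== SOURCE B (Python) =====
-- from collections import Counter
--
-- def word2rank_func(word2cnt):
-- 	# One stable sort of the items by descending count, then a single scan with a
-- 	# running dense rank (increment only when the count changes), recording each
-- 	# word's rank; finally emit a Counter in the original key order.
-- 	items = sorted(word2cnt.items(), key=lambda kv: kv[1], reverse=True)
-- 	rank_of_word = {}
-- 	rank = -1
-- 	prev = None
-- 	for word, cnt in items:
-- 		if cnt != prev:
-- 			rank += 1
-- 			prev = cnt
-- 		rank_of_word[word] = rank
-- 	word2rank = Counter()
-- 	for word in word2cnt:
-- 		word2rank[word] = rank_of_word[word]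
-- 	return word2rank
-- ===== Notes on version B (the rewrite author's own statement) =====
-- stated objective: alternative
-- what changed: Replaces A's three passes (collect a set of distinct counts, sort it, build a count-to-rank dict) by one stable descending sort of the items themselves and a single scan with a running dense rank that increments only when the count changes, recording each word's rank directly.
import Mathlib
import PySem

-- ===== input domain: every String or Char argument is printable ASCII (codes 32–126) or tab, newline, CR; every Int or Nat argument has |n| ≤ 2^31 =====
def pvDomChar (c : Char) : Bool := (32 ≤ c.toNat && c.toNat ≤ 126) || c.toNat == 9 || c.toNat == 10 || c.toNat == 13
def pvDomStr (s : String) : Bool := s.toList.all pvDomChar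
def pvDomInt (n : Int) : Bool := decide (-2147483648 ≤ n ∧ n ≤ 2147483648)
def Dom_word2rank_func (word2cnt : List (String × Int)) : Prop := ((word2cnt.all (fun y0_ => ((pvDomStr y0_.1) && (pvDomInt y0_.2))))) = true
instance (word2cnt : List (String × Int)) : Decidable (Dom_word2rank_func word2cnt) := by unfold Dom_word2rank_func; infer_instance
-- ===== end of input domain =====

-- B replaces A's distinct-count set + count→rank table by one stable descending
-- sort of the items and a single running-rank scan (objective: alternative decomposition).

-- ===== PORT A =====
-- cnt2rank[cnt] in A always hits (every count was added to cnt_set), so getD 0 is exact here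
def word2rank_func (word2cnt : List (String × Int)) : List (String × Int) :=
  let cntSet : PySem.Set Int :=
    word2cnt.foldl (fun s p => PySem.Set.add s p.2) PySem.Set.empty
  let cntList : List Int := PySem.List.sorted cntSet (fun x => x) true
  let cnt2rank : PySem.Dict Int Int :=
    (PySem.List.enumerate cntList 0).foldl (fun d p => d.insert p.2 p.1) PySem.Dict.empty
  let word2rank : PySem.Dict String Int :=
    word2cnt.foldl (fun d p => d.insert p.1 (cnt2rank.getD p.2 0)) PySem.Dict.empty
  word2rank.items

-- ===== PORT B =====
-- one step of B's scan over the sorted items: `if cnt != prev: rank += 1; prev = cnt` then `rank_of_word[word] = rank`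
def w2rStep (st : PySem.Dict String Int × Int × Option Int) (p : String × Int) :
    PySem.Dict String Int × Int × Option Int :=
  if some p.2 ≠ st.2.2 then (st.1.insert p.1 (st.2.1 + 1), st.2.1 + 1, some p.2)
  else (st.1.insert p.1 st.2.1, st.2.1, st.2.2)

-- rank_of_word[word] in B always hits (every word was inserted by the scan), so getD 0 is exact here
def word2rank_func_alt (word2cnt : List (String × Int)) : List (String × Int) :=
  let items : List (String × Int) := PySem.List.sorted word2cnt (fun p => p.2) true
  let rankOf : PySem.Dict String Int :=
    (items.foldl w2rStep (PySem.Dict.empty, -1, none)).1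
  let word2rank : PySem.Dict String Int :=
    word2cnt.foldl (fun d p => d.insert p.1 (rankOf.getD p.1 0)) PySem.Dict.empty
  word2rank.items

-- ===== PRECONDITION & SPEC =====
-- Pre_ excludes association lists with duplicate word keys, which cannot arise from A's
-- Python argument (a dict): on such lists the two last-write orders are accidental.
def Pre_word2rank_func (word2cnt : List (String × Int)) : Prop :=
  (word2cnt.map Prod.fst).Nodup
instance (word2cnt : List (String × Int)) : Decidable (Pre_word2rank_func word2cnt) := by
  unfold Pre_word2rank_func; infer_instance
def pvWitness_word2rank_func : (List (String × Int)) := [("a", 2), ("b", 1), ("c", 2)]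
def Spec_word2rank_func (word2cnt : List (String × Int)) (out : List (String × Int)) : Prop := out = word2rank_func_alt word2cnt
instance (word2cnt : List (String × Int)) (out : List (String × Int)) : Decidable (Spec_word2rank_func word2cnt out) := by unfold Spec_word2rank_func; infer_instance

-- ===== CLAIM (what is proved, stated in full; the proofs are below) =====
def Claim_equal_word2rank_func : Prop := ∀ (word2cnt : List (String × Int)), Dom_word2rank_func word2cnt → Pre_word2rank_func word2cnt → Spec_word2rank_func word2cnt (word2rank_func word2cnt)

-- ===== LEMMAS AND PROOFS =====

-- A's enumerate-fold never changes keys it does not insert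
lemma enumFold_getD_not_mem (t : List Int) (s : Int) (d : PySem.Dict Int Int) (c : Int)
    (h : c ∉ t) :
    ((PySem.List.enumerate t s).foldl (fun d p => d.insert p.2 p.1) d).getD c 0 = d.getD c 0 := by
  induction t generalizing s d with
  | nil => rfl
  | cons a t ih =>
    simp only [List.mem_cons, not_or] at h
    rw [PySem.List.enumerate_cons, List.foldl_cons, ih (s + 1) _ h.2]
    exact PySem.Dict.getD_insert_of_ne d s 0 h.1

-- A's count→rank table: on a strictly decreasing list, the stored rank of c
-- (offset by the enumeration start s) counts the entries greater than c
lemma enumFold_getD_rank (L : List Int) (s : Int) (d : PySem.Dict Int Int) (c : Int)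
    (hp : L.Pairwise (· > ·)) (hc : c ∈ L) :
    ((PySem.List.enumerate L s).foldl (fun d p => d.insert p.2 p.1) d).getD c 0
      = s + (L.countP (fun x => decide (c < x)) : Int) := by
  induction L generalizing s d with
  | nil => cases hc
  | cons a t ih =>
    rcases List.pairwise_cons.mp hp with ⟨ha, hp'⟩
    rw [PySem.List.enumerate_cons, List.foldl_cons]
    rcases List.mem_cons.mp hc with rfl | hct
    · have hnot : c ∉ t := fun hm => lt_irrefl c (ha c hm)
      rw [enumFold_getD_not_mem t (s + 1) _ c hnot, PySem.Dict.getD_insert_self]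
      have h0 : t.countP (fun x => decide (c < x)) = 0 := by
        rw [List.countP_eq_zero]
        intro x hx
        simpa using not_lt.mpr (ha x hx).le
      simp [h0]
    · have hca : c < a := ha c hct
      rw [ih (s + 1) _ hp' hct]
      simp [hca]
      ring

-- the set-building fold appends the fresh first occurrences
lemma foldl_setadd_eq (xs acc : List Int) :
    List.foldl PySem.Set.add acc xs
      = acc ++ (PySem.Set.ofList xs).filter (fun y => !acc.contains y) := by
  induction xs generalizing acc with
  | nil => simp [PySem.Set.ofList_eq_foldl]
  | cons x xs ih =>
    have h2 : PySem.Set.ofList (x :: xs)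
        = x :: (PySem.Set.ofList xs).filter (fun y => !([x] : List Int).contains y) := by
      rw [PySem.Set.ofList_eq_foldl, List.foldl_cons]
      have hadd : PySem.Set.add ([] : List Int) x = [x] := rfl
      rw [hadd, ih [x]]
      simp
    rw [List.foldl_cons, ih, h2]
    by_cases hx : x ∈ acc
    · have haddx : PySem.Set.add acc x = acc := by
        simp [PySem.Set.add, PySem.Set.contains, hx]
      rw [haddx, List.filter_cons]
      have : (!acc.contains x) = false := by simpa using hx
      rw [this]
      simp only [List.filter_filter]
      congr 1
      apply List.filter_congr
      intro y _
      by_cases hy : y ∈ acc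
      · simp [hy]
      · have hyx : y ≠ x := by rintro rfl; exact hy hx
        simp [hy, hyx]
    · have haddx : PySem.Set.add acc x = acc ++ [x] := by
        simp [PySem.Set.add, PySem.Set.contains, hx]
      rw [haddx, List.filter_cons]
      have : (!acc.contains x) = true := by simpa using hx
      rw [this]
      simp only [List.filter_filter, List.append_assoc, List.singleton_append]
      congr 2
      apply List.filter_congr
      intro y _
      by_cases hy : y ∈ acc <;> simp [hy]

-- first-occurrence dedup of a cons
lemma dedup_cons (x : Int) (xs : List Int) :
    PySem.List.dedup (x :: xs)
      = x :: (PySem.List.dedup xs).filter (fun y => !([x] : List Int).contains y) := by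
  rw [PySem.List.dedup_eq_ofList, PySem.List.dedup_eq_ofList,
      PySem.Set.ofList_eq_foldl, List.foldl_cons]
  have hadd : PySem.Set.add ([] : List Int) x = [x] := rfl
  rw [hadd, foldl_setadd_eq xs [x]]
  simp

-- on a Nodup list containing c, the ≤-count is the <-count plus one (for c itself)
lemma countP_le_eq_lt_succ (L : List Int) (c : Int) (hN : L.Nodup) (hc : c ∈ L) :
    L.countP (fun x => decide (c ≤ x)) = L.countP (fun x => decide (c < x)) + 1 := by
  induction L with
  | nil => cases hc
  | cons a t ih =>
    rcases List.nodup_cons.mp hN with ⟨hna, hN'⟩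
    rcases List.mem_cons.mp hc with rfl | hct
    · have h1 : t.countP (fun x => decide (c ≤ x)) = t.countP (fun x => decide (c < x)) := by
        apply List.countP_congr
        intro x hx
        have hxa : x ≠ c := fun e => hna (e ▸ hx)
        simp only [decide_eq_true_eq]
        omega
      simp [h1]
    · have hac : a ≠ c := fun e => hna (e ▸ hct)
      have := ih hN' hct
      simp only [List.countP_cons, this]
      have : (decide (c ≤ a)) = (decide (c < a)) := by
        by_cases h : c < a <;> simp_all <;> omega
      rw [this]
      omega

-- B's scan never changes keys it does not insert
lemma scan_getD_not_mem (t : List (String × Int)) (st : PySem.Dict String Int × Int × Option Int)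
    (w : String) (h : w ∉ t.map Prod.fst) :
    (t.foldl w2rStep st).1.getD w 0 = st.1.getD w 0 := by
  induction t generalizing st with
  | nil => rfl
  | cons p t ih =>
    simp only [List.map_cons, List.mem_cons, not_or] at h
    rw [List.foldl_cons, ih _ h.2]
    unfold w2rStep
    split_ifs <;> exact PySem.Dict.getD_insert_of_ne _ _ _ h.1

-- B's scan over a descending list: the rank stored for (w, c) is r plus the number
-- of distinct counts that are ≥ c and differ from the sentinel prev
lemma scan_getD_rank (s : List (String × Int)) :
    ∀ (d : PySem.Dict String Int) (r : Int) (prev : Option Int) (w : String) (c : Int),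
      s.Pairwise (fun a b => b.2 ≤ a.2) →
      (∀ pc, prev = some pc → ∀ q ∈ s, q.2 ≤ pc) →
      (s.map Prod.fst).Nodup →
      (w, c) ∈ s →
      (s.foldl w2rStep (d, r, prev)).1.getD w 0
        = r + ((PySem.List.dedup (s.map Prod.snd)).countP
                 (fun x => decide (c ≤ x) && (some x != prev)) : Int) := by
  induction s with
  | nil => intro _ _ _ _ _ _ _ _ hm; cases hm
  | cons p t ih =>
    intro d r prev w c hp hprev hnd hm
    obtain ⟨w₀, c₀⟩ := p
    rcases List.pairwise_cons.mp hp with ⟨hhead, hp'⟩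
    rw [List.map_cons] at hnd
    rcases List.nodup_cons.mp hnd with ⟨hw₀, hnd'⟩
    have hded := dedup_cons c₀ (t.map Prod.snd)
    have hstep : ∀ (v r' : Int),
        w2rStep (d, r, prev) (w₀, c₀) = (d.insert w₀ v, r', some c₀) →
        (((w₀, c₀) :: t).foldl w2rStep (d, r, prev)).1.getD w 0
          = (t.foldl w2rStep (d.insert w₀ v, r', some c₀)).1.getD w 0 := by
      intro v r' h; rw [List.foldl_cons, h]
    rcases List.mem_cons.mp hm with heq | hmt
    · -- the head item: c = c₀, w = w₀
      have hw : w = w₀ := congrArg Prod.fst heq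
      have hcc : c = c₀ := congrArg Prod.snd heq
      subst hw; subst hcc
      have hcount : ((PySem.List.dedup (((w, c) :: t).map Prod.snd)).countP
            (fun x => decide (c ≤ x) && (some x != prev)) : Int)
          = (if some c ≠ prev then 1 else 0) := by
        simp only [List.map_cons] at hded ⊢
        rw [hded, List.countP_cons, List.countP_filter]
        have h0 : (PySem.List.dedup (t.map Prod.snd)).countP
            (fun x => (decide (c ≤ x) && (some x != prev)) && !([c] : List Int).contains x) = 0 := by
          rw [List.countP_eq_zero]
          intro x hx
          have hxt : x ∈ t.map Prod.snd := (PySem.List.mem_dedup _ _).mp hx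
          rcases List.mem_map.mp hxt with ⟨q, hq, rfl⟩
          have hle : q.2 ≤ c := hhead q hq
          by_cases hxc : q.2 = c
          · simp [hxc]
          · have : ¬ c ≤ q.2 := fun h => hxc (le_antisymm hle h)
            simp [this]
        rw [h0]
        by_cases hne : some c = prev
        · simp [hne]
        · have : (some c != prev) = true := by simpa using hne
          simp [this, hne]
      rw [hcount]
      by_cases hne : some c ≠ prev
      · rw [hstep (r + 1) (r + 1) (by simp [w2rStep, hne]),
            scan_getD_not_mem t _ w hw₀, PySem.Dict.getD_insert_self]
        simp [hne]
      · rw [not_ne_iff] at hne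
        rw [hstep r r (by simp [w2rStep, hne]),
            scan_getD_not_mem t _ w hw₀, PySem.Dict.getD_insert_self]
        simp [hne]
    · -- an item of the tail
      have hwne : w ≠ w₀ := by
        rintro rfl
        exact hw₀ (List.mem_map.mpr ⟨(w, c), hmt, rfl⟩)
      have hct : c ≤ c₀ := hhead (w, c) hmt
      have hprev' : ∀ pc, (some c₀ : Option Int) = some pc → ∀ q ∈ t, q.2 ≤ pc := by
        rintro pc hpc q hq
        injection hpc with hpc
        exact hpc ▸ hhead q hq
      have hxprev : ∀ x : Int, x ∈ PySem.List.dedup (t.map Prod.snd) → x ≠ c₀ →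
          (some x != prev) = true := by
        intro x hx hxc
        rcases prev with _ | pc
        · rfl
        · have hle : x ≤ c₀ := by
            rcases List.mem_map.mp ((PySem.List.mem_dedup _ _).mp hx) with ⟨q, hq, rfl⟩
            exact hhead q hq
          have hc₀pc : c₀ ≤ pc := hprev pc rfl (w₀, c₀) (List.mem_cons_self)
          simp only [bne_iff_ne, ne_eq, Option.some.injEq]
          omega
      have hcount : ((PySem.List.dedup (((w₀, c₀) :: t).map Prod.snd)).countP
            (fun x => decide (c ≤ x) && (some x != prev)))
          = (if some c₀ ≠ prev then 1 else 0)
            + (PySem.List.dedup (t.map Prod.snd)).countP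
                (fun x => decide (c ≤ x) && (some x != some c₀)) := by
        simp only [List.map_cons] at hded ⊢
        rw [hded, List.countP_cons, List.countP_filter]
        have hcong : (PySem.List.dedup (t.map Prod.snd)).countP
              (fun x => (decide (c ≤ x) && (some x != prev)) && !([c₀] : List Int).contains x)
            = (PySem.List.dedup (t.map Prod.snd)).countP
                (fun x => decide (c ≤ x) && (some x != some c₀)) := by
          apply List.countP_congr
          intro x hx
          by_cases hxc : x = c₀
          · subst hxc; simp
          · have := hxprev x hx hxc
            have hne' : (some x != some c₀) = true := by simpa using hxc
            simp [this, hne', hxc]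
        rw [hcong]
        by_cases hne : some c₀ = prev
        · simp [hne, hct]
        · have : (some c₀ != prev) = true := by simpa using hne
          simp [this, hne, hct]
          omega
      rw [hcount]
      by_cases hne : some c₀ ≠ prev
      · rw [hstep (r + 1) (r + 1) (by simp [w2rStep, hne]),
            ih _ _ _ _ _ hp' hprev' hnd' hmt]
        simp [hne]
        ring
      · rw [not_ne_iff] at hne
        rw [hstep r r (by simp [w2rStep, hne]),
            ih _ _ _ _ _ hp' hprev' hnd' hmt]
        simp [hne]

-- ===== VERDICT (by name: the statement is the Claim_ definition above) =====
theorem word2rank_func_spec : Claim_equal_word2rank_func := by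
  intro w _ hpre
  unfold Spec_word2rank_func word2rank_func word2rank_func_alt
  simp only []
  -- name the intermediate structures
  set cntSet : PySem.Set Int := w.foldl (fun s p => PySem.Set.add s p.2) PySem.Set.empty with hcntSet
  set cntList : List Int := PySem.List.sorted cntSet (fun x => x) true with hcntList
  set cnt2rank : PySem.Dict Int Int :=
    (PySem.List.enumerate cntList 0).foldl (fun d p => d.insert p.2 p.1) PySem.Dict.empty with hcnt2rank
  set items : List (String × Int) := PySem.List.sorted w (fun p => p.2) true with hitems
  set rankOf : PySem.Dict String Int := (items.foldl w2rStep (PySem.Dict.empty, -1, none)).1 with hrankOf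
  -- both final dict-building loops insert fresh distinct keys, so items = the mapped list
  rw [PySem.Dict.items_foldl_insert_fresh w Prod.fst (fun p => cnt2rank.getD p.2 0)
        PySem.Dict.empty (fun a _ => PySem.Dict.contains_empty a.1) hpre,
      PySem.Dict.items_foldl_insert_fresh w Prod.fst (fun p => rankOf.getD p.1 0)
        PySem.Dict.empty (fun a _ => PySem.Dict.contains_empty a.1) hpre]
  apply congrArg (PySem.Dict.empty.items ++ ·)
  apply List.map_congr_left
  intro p hpw
  -- structural facts
  have hcntSet' : cntSet = PySem.Set.ofList (w.map Prod.snd) := by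
    rw [hcntSet, PySem.Set.ofList_eq_foldl, List.foldl_map]
    rfl
  have hperm : cntList.Perm cntSet := PySem.List.sorted_perm cntSet (fun x => x) true
  have hnodupCnt : cntList.Nodup := hperm.nodup_iff.mpr (hcntSet' ▸ PySem.Set.nodup_ofList _)
  have hmemCnt : ∀ x : Int, x ∈ cntList ↔ x ∈ w.map Prod.snd := by
    intro x
    rw [PySem.List.mem_sorted, hcntSet', PySem.Set.mem_ofList]
  have hdec : cntList.Pairwise (· > ·) := by
    have h1 : cntList.Pairwise (fun a b : Int => b ≤ a) :=
      PySem.List.sorted_pairwise_rev cntSet (fun x => x)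
    have h2 : cntList.Pairwise (fun a b : Int => a ≠ b) := hnodupCnt
    exact (h1.and h2).imp (fun h => lt_of_le_of_ne h.1 h.2.symm)
  have hpc : p.2 ∈ cntList := (hmemCnt p.2).mpr (List.mem_map_of_mem hpw)
  -- A's value
  have hA : cnt2rank.getD p.2 0 = (cntList.countP (fun x => decide (p.2 < x)) : Int) := by
    rw [hcnt2rank, enumFold_getD_rank cntList 0 PySem.Dict.empty p.2 hdec hpc]
    ring
  -- B's value
  have hpi : (p.1, p.2) ∈ items := by
    rw [hitems, PySem.List.mem_sorted]
    simpa using hpw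
  have hndItems : (items.map Prod.fst).Nodup :=
    (((PySem.List.sorted_perm w (fun p => p.2) true).map Prod.fst).nodup_iff).mpr hpre
  have hB : rankOf.getD p.1 0
      = -1 + ((PySem.List.dedup (items.map Prod.snd)).countP
               (fun x => decide (p.2 ≤ x) && (some x != (none : Option Int))) : Int) := by
    rw [hrankOf]
    exact scan_getD_rank items PySem.Dict.empty (-1) none p.1 p.2
      (PySem.List.sorted_pairwise_rev w (fun p => p.2)) (by rintro pc ⟨⟩) hndItems hpi
  have hmemD : ∀ x : Int, x ∈ PySem.List.dedup (items.map Prod.snd) ↔ x ∈ cntList := by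
    intro x
    rw [PySem.List.mem_dedup, hmemCnt]
    constructor
    · rintro hx
      rcases List.mem_map.mp hx with ⟨q, hq, rfl⟩
      exact List.mem_map.mpr ⟨q, (PySem.List.mem_sorted _ _ _ _).mp hq, rfl⟩
    · rintro hx
      rcases List.mem_map.mp hx with ⟨q, hq, rfl⟩
      exact List.mem_map.mpr ⟨q, (PySem.List.mem_sorted _ _ _ _).mpr hq, rfl⟩
  have hpermD : (PySem.List.dedup (items.map Prod.snd)).Perm cntList :=
    (List.perm_ext_iff_of_nodup (PySem.List.nodup_dedup _) hnodupCnt).mpr hmemD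
  have hpd : p.2 ∈ PySem.List.dedup (items.map Prod.snd) := (hmemD p.2).mpr hpc
  have hBcount : (PySem.List.dedup (items.map Prod.snd)).countP
        (fun x => decide (p.2 ≤ x) && (some x != (none : Option Int)))
      = cntList.countP (fun x => decide (p.2 < x)) + 1 := by
    have hdrop : (PySem.List.dedup (items.map Prod.snd)).countP
          (fun x => decide (p.2 ≤ x) && (some x != (none : Option Int)))
        = (PySem.List.dedup (items.map Prod.snd)).countP (fun x => decide (p.2 ≤ x)) := by
      apply List.countP_congr
      intro x _
      simp
    rw [hdrop, countP_le_eq_lt_succ _ p.2 (PySem.List.nodup_dedup _) hpd,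
        hpermD.countP_eq]
  have hval : cnt2rank.getD p.2 0 = rankOf.getD p.1 0 := by
    rw [hA, hB, hBcount]
    push_cast
    ring
  rw [hval]
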